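-- pv_equiv track=rewrite | github.com/derek-elliott/aoc2018 | day2.py | check_counts
-- ===== SOURCE A (Python) =====
-- def check_counts(letter_counts):
--     counts = [0, 0]
--     for key in letter_counts:
--         if letter_counts[key] == 2:
--             counts[0] += 1
--         if letter_counts[key] == 3:
--             counts[1] += 1
--     return [1 if counts[0] > 0 else 0, 1 if counts[1] > 0 else 0]
-- ===== SOURCE B (Python) =====
-- def check_counts(letter_counts):
--     def go(vals, has2, has3):
--         if has2 and has3:
--             return [1, 1]
--         if not vals:
--             return [1 if has2 else 0, 1 if has3 else 0]
--         v = vals[0]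
--         return go(vals[1:], has2 or v == 2, has3 or v == 3)
--     return go(list(letter_counts.values()), False, False)
-- ===== Notes on version B (the rewrite author's own statement) =====
-- stated objective: alternative
-- what changed: A increments two counters over every key with dict lookups and then thresholds them; B is a short-circuiting recursion over the value list carrying two boolean flags that returns early as soon as both flags are set, never counting anything.
import Mathlib
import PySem

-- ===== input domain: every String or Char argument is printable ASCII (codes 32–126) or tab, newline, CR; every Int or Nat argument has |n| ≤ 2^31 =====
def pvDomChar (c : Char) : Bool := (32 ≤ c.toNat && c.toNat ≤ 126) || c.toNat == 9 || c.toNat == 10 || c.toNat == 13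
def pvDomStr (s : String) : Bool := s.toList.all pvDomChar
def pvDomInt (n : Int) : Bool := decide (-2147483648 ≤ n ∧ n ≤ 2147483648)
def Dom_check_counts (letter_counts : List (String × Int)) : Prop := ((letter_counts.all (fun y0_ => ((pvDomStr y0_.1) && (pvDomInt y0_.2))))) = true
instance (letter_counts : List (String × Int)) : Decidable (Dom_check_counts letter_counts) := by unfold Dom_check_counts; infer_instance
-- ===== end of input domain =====

-- B replaces A's count-then-threshold loop with a short-circuiting flag recursion
-- over the value list that stops as soon as both 2 and 3 have been seen (objective: alternative).

-- ===== PORT A =====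
-- counts = [0,0]; for key in letter_counts: bump counts[0]/counts[1] on value 2/3; then threshold.
def check_counts (letter_counts : List (String × Int)) : List Int :=
  let d := PySem.Dict.ofList letter_counts
  let counts :=
    d.keys.foldl (fun (c : Int × Int) key =>
      let c := if d.getD key 0 = 2 then (c.1 + 1, c.2) else c
      if d.getD key 0 = 3 then (c.1, c.2 + 1) else c) (0, 0)
  [if counts.1 > 0 then 1 else 0, if counts.2 > 0 then 1 else 0]

-- ===== PORT B =====
-- def go(vals, has2, has3): early return [1,1] when both flags set; base case thresholds flags;
-- otherwise recurse on the tail with updated flags.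
def check_counts_go (vals : List Int) (has2 has3 : Bool) : List Int :=
  if has2 && has3 then [1, 1]
  else
    match vals with
    | [] => [if has2 then 1 else 0, if has3 then 1 else 0]
    | v :: rest => check_counts_go rest (has2 || v == 2) (has3 || v == 3)

def check_counts_alt (letter_counts : List (String × Int)) : List Int :=
  check_counts_go (PySem.Dict.ofList letter_counts).values false false

-- ===== PRECONDITION & SPEC =====
def Spec_check_counts (letter_counts : List (String × Int)) (out : List Int) : Prop := out = check_counts_alt letter_counts
instance (letter_counts : List (String × Int)) (out : List Int) : Decidable (Spec_check_counts letter_counts out) := by unfold Spec_check_counts; infer_instance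

-- ===== CLAIM (what is proved, stated in full; the proofs are below) =====
def Claim_equal_check_counts : Prop := ∀ (letter_counts : List (String × Int)), Dom_check_counts letter_counts → Spec_check_counts letter_counts (check_counts letter_counts)

-- ===== LEMMAS AND PROOFS =====

-- A's counter loop computes the two counts of keys whose value is 2 resp. 3.
theorem pv_fold_eq (d : PySem.Dict String Int) (l : List String) (c : Int × Int) :
    (l.foldl (fun (c : Int × Int) key =>
        let c := if d.getD key 0 = 2 then (c.1 + 1, c.2) else c
        if d.getD key 0 = 3 then (c.1, c.2 + 1) else c) c)
      = (c.1 + (l.countP (fun k => decide (d.getD k 0 = 2)) : Int),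
         c.2 + (l.countP (fun k => decide (d.getD k 0 = 3)) : Int)) := by
  induction l generalizing c with
  | nil => simp
  | cons k l ih =>
    simp only [List.foldl_cons, List.countP_cons, ih]
    split_ifs <;> simp_all [Prod.ext_iff] <;> omega

-- B's recursion returns the flags OR'd with "does the list contain 2 / 3".
theorem pv_go_eq (vals : List Int) (h2 h3 : Bool) :
    check_counts_go vals h2 h3
      = [if h2 || vals.any (fun v => v == 2) then 1 else 0,
         if h3 || vals.any (fun v => v == 3) then 1 else 0] := by
  induction vals generalizing h2 h3 with
  | nil => simp [check_counts_go]
  | cons v rest ih =>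
    rw [check_counts_go]
    cases h2 <;> cases h3 <;> simp [ih, List.any_cons]

theorem pv_values_any (d : PySem.Dict String Int) (hnd : d.keys.Nodup) (v : Int) :
    d.values.any (fun x => x == v) = d.keys.any (fun k => d.getD k 0 == v) := by
  rw [PySem.Dict.values_eq_map_keys d hnd 0, List.any_map]
  rfl

-- ===== VERDICT (by name: the statement is the Claim_ definition above) =====
theorem check_counts_spec : Claim_equal_check_counts := by
  intro lc _
  unfold Spec_check_counts check_counts check_counts_alt
  set d := PySem.Dict.ofList lc with hd
  have hnd : d.keys.Nodup := PySem.Dict.nodup_keys_ofList lc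
  dsimp only
  rw [pv_fold_eq d d.keys (0, 0), pv_go_eq, pv_values_any d hnd 2, pv_values_any d hnd 3]
  have hc : ∀ v : Int, (0 < (0 : Int) + (d.keys.countP (fun k => decide (d.getD k 0 = v)) : Int))
      ↔ d.keys.any (fun k => d.getD k 0 == v) = true := by
    intro v
    rw [zero_add]
    rw [show ((0:Int) < (d.keys.countP (fun k => decide (d.getD k 0 = v)) : Int))
        ↔ 0 < d.keys.countP (fun k => decide (d.getD k 0 = v)) by exact_mod_cast Iff.rfl,
      List.countP_pos_iff, List.any_eq_true]
    simp
  simp only [gt_iff_lt, hc, Bool.false_or]
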